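-- pv_equiv track=rewrite | github.com/wallisga/slippi_stats | utils.py | find_player_in_game_data
-- ===== SOURCE A (Python) =====
-- def find_player_in_game_data(parsed_players, target_player_tag):
--     """
--     Find a specific player in parsed game data.
--
--     Args:
--         parsed_players (list): List of player dictionaries
--         target_player_tag (str): Player tag to search for
--
--     Returns:
--         tuple: (player_data, opponent_data) or (None, None) if not found
--     """
--     target_lower = target_player_tag.lower()
--
--     for player in parsed_players:
--         if player.get('player_tag', '').lower() == target_lower:
--             # Find opponent (the other player)
--             for opponent in parsed_players:
--                 if opponent.get('player_tag', '').lower() != target_lower: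
--                     return player, opponent
--             return player, None
--
--     return None, None
-- ===== SOURCE B (Python) =====
-- def find_player_in_game_data(parsed_players, target_player_tag):
--     """Single linear pass keeping the first match and the first differing player."""
--     target_lower = target_player_tag.lower()
--     first_match = None
--     first_opponent = None
--     for player in parsed_players:
--         if player.get('player_tag', '').lower() == target_lower:
--             if first_match is None:
--                 first_match = player
--         elif first_opponent is None:
--             first_opponent = player
--     if first_match is None:
--         return None, None
--     return first_match, first_opponent
-- ===== Notes on version B (the rewrite author's own statement) =====
-- stated objective: alternative
-- what changed: Replaced A's outer loop with a full inner rescan of the list by a single linear pass that keeps the first matching player and the first differing player in two sentinel variables.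
import Mathlib
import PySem

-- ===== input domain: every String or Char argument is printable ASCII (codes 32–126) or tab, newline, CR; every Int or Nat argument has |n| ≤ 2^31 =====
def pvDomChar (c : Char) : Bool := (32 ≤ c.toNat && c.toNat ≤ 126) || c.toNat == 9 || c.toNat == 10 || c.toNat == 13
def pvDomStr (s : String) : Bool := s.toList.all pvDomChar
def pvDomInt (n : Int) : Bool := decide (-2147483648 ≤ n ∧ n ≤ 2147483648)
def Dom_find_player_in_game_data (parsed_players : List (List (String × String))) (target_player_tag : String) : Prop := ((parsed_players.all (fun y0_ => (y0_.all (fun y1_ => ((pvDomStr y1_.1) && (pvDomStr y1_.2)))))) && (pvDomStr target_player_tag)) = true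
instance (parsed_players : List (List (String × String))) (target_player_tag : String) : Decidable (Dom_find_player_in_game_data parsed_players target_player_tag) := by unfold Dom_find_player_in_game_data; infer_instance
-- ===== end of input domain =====

-- B replaces A's outer-loop-plus-inner-rescan by one linear pass keeping two sentinels (first match, first differing player): a different decomposition, same behaviour.


-- ===== PORT A =====
-- player.get('player_tag', '').lower()
def pvTagLower (player : List (String × String)) : String :=
  PySem.Str.lower (((player.find? (fun kv => kv.1 == "player_tag")).map (·.2)).getD "")

-- inner loop: "for opponent in parsed_players: if opponent.get(...).lower() != target_lower: return opponent"; none = fell through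
def pvInnerA (tl : String) : List (List (String × String)) → Option (List (String × String))
  | [] => none
  | opponent :: rest => if pvTagLower opponent ≠ tl then some opponent else pvInnerA tl rest

-- outer loop over parsed_players; `full` is the whole list the inner loop rescans
def pvOuterA (tl : String) (full : List (List (String × String))) :
    List (List (String × String)) → (Option (List (String × String))) × (Option (List (String × String)))
  | [] => (none, none)
  | player :: rest =>
    if pvTagLower player = tl then (some player, pvInnerA tl full)
    else pvOuterA tl full rest

def find_player_in_game_data (parsed_players : List (List (String × String))) (target_player_tag : String) : (Option (List (String × String))) × (Option (List (String × String))) :=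
  let target_lower := PySem.Str.lower target_player_tag
  pvOuterA target_lower parsed_players parsed_players

-- ===== PORT B =====
-- one pass: update (first_match, first_opponent) only while still none
def pvLoopB (tl : String) :
    List (List (String × String)) →
    (Option (List (String × String))) × (Option (List (String × String))) →
    (Option (List (String × String))) × (Option (List (String × String)))
  | [], st => st
  | player :: rest, (fm, fo) =>
    if pvTagLower player = tl then
      pvLoopB tl rest (if fm = none then some player else fm, fo)
    else
      pvLoopB tl rest (fm, if fo = none then some player else fo)

def find_player_in_game_data_alt (parsed_players : List (List (String × String))) (target_player_tag : String) : (Option (List (String × String))) × (Option (List (String × String))) :=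
  let target_lower := PySem.Str.lower target_player_tag
  let st := pvLoopB target_lower parsed_players (none, none)
  if st.1 = none then (none, none) else (st.1, st.2)

-- ===== PRECONDITION & SPEC =====
def Spec_find_player_in_game_data (parsed_players : List (List (String × String))) (target_player_tag : String) (out : (Option (List (String × String))) × (Option (List (String × String)))) : Prop := out = find_player_in_game_data_alt parsed_players target_player_tag
instance (parsed_players : List (List (String × String))) (target_player_tag : String) (out : (Option (List (String × String))) × (Option (List (String × String)))) : Decidable (Spec_find_player_in_game_data parsed_players target_player_tag out) := by unfold Spec_find_player_in_game_data; infer_instance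

-- ===== CLAIM (what is proved, stated in full; the proofs are below) =====
def Claim_equal_find_player_in_game_data : Prop := ∀ (parsed_players : List (List (String × String))) (target_player_tag : String), Dom_find_player_in_game_data parsed_players target_player_tag → Spec_find_player_in_game_data parsed_players target_player_tag (find_player_in_game_data parsed_players target_player_tag)

-- ===== LEMMAS AND PROOFS =====

-- B's loop: starting state (fm, fo), it fills each slot with the first eligible element, if any.
theorem pvLoopB_char (tl : String) (l : List (List (String × String)))
    (fm fo : Option (List (String × String))) :
    pvLoopB tl l (fm, fo) =
      (fm.orElse (fun _ => l.find? (fun p => pvTagLower p = tl)),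
       fo.orElse (fun _ => l.find? (fun p => pvTagLower p ≠ tl))) := by
  induction l generalizing fm fo with
  | nil => cases fm <;> cases fo <;> simp [pvLoopB, Option.orElse]
  | cons p rest ih =>
    by_cases h : pvTagLower p = tl
    · simp only [pvLoopB, if_pos h, ih]
      cases fm <;> simp [List.find?, h, Option.orElse]
    · simp only [pvLoopB, if_neg h, ih]
      cases fo <;> simp [List.find?, h, Option.orElse]

-- A's inner loop is find? of the first differing player.
theorem pvInnerA_char (tl : String) (l : List (List (String × String))) :
    pvInnerA tl l = l.find? (fun p => pvTagLower p ≠ tl) := by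
  induction l with
  | nil => rfl
  | cons p rest ih =>
    by_cases h : pvTagLower p = tl <;> simp [pvInnerA, List.find?, h, ih]

-- A's outer loop: characterised by find? of the first matching player.
theorem pvOuterA_char (tl : String) (full l : List (List (String × String))) :
    pvOuterA tl full l =
      match l.find? (fun p => pvTagLower p = tl) with
      | none => (none, none)
      | some p => (some p, pvInnerA tl full) := by
  induction l with
  | nil => rfl
  | cons p rest ih =>
    by_cases h : pvTagLower p = tl <;> simp [pvOuterA, List.find?, h, ih]

-- ===== VERDICT (by name: the statement is the Claim_ definition above) =====
theorem find_player_in_game_data_spec : Claim_equal_find_player_in_game_data := by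
  intro ps t _
  show _ = _
  unfold find_player_in_game_data find_player_in_game_data_alt
  simp only [pvOuterA_char, pvLoopB_char, pvInnerA_char, Option.orElse]
  cases h : ps.find? (fun p => pvTagLower p = PySem.Str.lower t) <;> simp
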